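-- pv_equiv track=rewrite | github.com/Parik27/V.Rainbomizer | scripts/voice-line-gen.py | process_str_block
-- ===== SOURCE A (Python) =====
-- def process_str_block (block):
--     string = ""
--     strings = []
--     for char in block:
--         if char == 0:
--             if len(string) != 0:
--                 strings.append (string)
--
--             string = ""
--
--         if char < 127 and char > 31:
--             string += chr(char)
--
--     return strings
-- ===== SOURCE B (Python) =====
-- def process_str_block(block):
--     # Encode each byte: NUL stays a separator, printables become chars, others vanish;
--     # then split on NUL, drop the unterminated tail, keep the non-empty pieces.
--     enc = ''.join('\x00' if c == 0 else (chr(c) if 31 < c < 127 else '') for c in block)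
--     return [s for s in enc.split('\x00')[:-1] if s]
-- ===== Notes on version B (the rewrite author's own statement) =====
-- stated objective: simpler
-- what changed: Replaces the stateful accumulator loop (flush-on-null with a pending buffer) by a stateless encode-join, split on NUL, drop the unterminated tail, and filter non-empty pieces.
import Mathlib
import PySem

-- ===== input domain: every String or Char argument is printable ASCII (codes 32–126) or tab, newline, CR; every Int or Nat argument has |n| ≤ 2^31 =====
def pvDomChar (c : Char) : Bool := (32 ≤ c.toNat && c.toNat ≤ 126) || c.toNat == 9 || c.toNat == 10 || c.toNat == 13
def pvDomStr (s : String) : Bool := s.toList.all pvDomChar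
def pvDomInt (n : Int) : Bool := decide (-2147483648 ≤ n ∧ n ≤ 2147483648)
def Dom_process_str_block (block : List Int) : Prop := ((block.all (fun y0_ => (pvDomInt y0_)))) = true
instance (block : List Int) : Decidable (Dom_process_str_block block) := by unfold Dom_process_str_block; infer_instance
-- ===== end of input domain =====

-- B replaces A's stateful flush-on-null accumulator loop by encode → split on NUL → drop tail → filter (objective: simpler).

-- ===== PORT A =====
-- A's `string` accumulator (a Python str of printable chars) is carried as a List Char and
-- converted with String.ofList at append time (exact: only code points 32..126 are pushed).
def pvStepA (st : List Char × List String) (char : Int) : List Char × List String :=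
  let string := st.1
  let strings := st.2
  let p := if char = 0 then
      (([] : List Char), if string.length ≠ 0 then strings ++ [String.ofList string] else strings)
    else (string, strings)
  let string := p.1
  let strings := p.2
  let string := if char < 127 ∧ char > 31 then string ++ [Char.ofNat char.toNat] else string
  (string, strings)

def process_str_block (block : List Int) : List String :=
  (block.foldl pvStepA ([], [])).2

-- ===== PORT B =====
-- Source B: enc = ''.join('\x00' if c == 0 else (chr(c) if 31 < c < 127 else '') for c in block)
def pvEncB (block : List Int) : List Char :=
  block.flatMap (fun c =>
    if c = 0 then [Char.ofNat 0]
    else if 31 < c ∧ c < 127 then [Char.ofNat c.toNat] else [])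

-- Source B: [s for s in enc.split('\x00')[:-1] if s]  (str.split on one char = List.splitOn)
def process_str_block_alt (block : List Int) : List String :=
  let enc := pvEncB block
  (((enc.splitOn (Char.ofNat 0)).dropLast).map String.ofList).filter (fun s => s ≠ "")

-- ===== PRECONDITION & SPEC =====
def Spec_process_str_block (block : List Int) (out : List String) : Prop := out = process_str_block_alt block
instance (block : List Int) (out : List String) : Decidable (Spec_process_str_block block out) := by unfold Spec_process_str_block; infer_instance

-- ===== CLAIM (what is proved, stated in full; the proofs are below) =====
def Claim_equal_process_str_block : Prop := ∀ (block : List Int), Dom_process_str_block block → Spec_process_str_block block (process_str_block block)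

-- ===== LEMMAS AND PROOFS =====

theorem pv_ch_ne_aux : ∀ n : Nat, n < 127 → 31 < n → ((Char.ofNat n == Char.ofNat 0) = false) := by
  decide

theorem pv_ch_ne (c : Int) (h1 : 31 < c) (h2 : c < 127) :
    ((Char.ofNat c.toNat == Char.ofNat 0) = true) → False := by
  intro h
  rw [pv_ch_ne_aux c.toNat (by omega) (by omega)] at h
  exact Bool.false_ne_true h

theorem pv_key (block : List Int) : ∀ (s : List Char) (acc : List String),
    (∀ c ∈ s, ¬ ((c == Char.ofNat 0) = true)) →
    (block.foldl pvStepA (s, acc)).2 =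
      acc ++ ((((s ++ pvEncB block).splitOnP (· == Char.ofNat 0)).map String.ofList).dropLast).filter
        (fun t => t ≠ "") := by
  induction block with
  | nil =>
    intro s acc h
    have h1 : (s ++ pvEncB []).splitOnP (· == Char.ofNat 0) = [s] := by
      rw [show pvEncB [] = ([] : List Char) from rfl, List.append_nil]
      exact List.splitOnP_eq_single _ _ h
    rw [List.foldl_nil, h1]
    simp
  | cons c rest ih =>
    intro s acc h
    rw [List.foldl_cons]
    by_cases hc : c = 0
    · subst hc
      have hstep : pvStepA (s, acc) 0 =
          ([], if s.length ≠ 0 then acc ++ [String.ofList s] else acc) := by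
        simp [pvStepA]
      rw [hstep, ih [] _ (by simp)]
      have hsplit := List.splitOnP_first (p := (· == Char.ofNat 0)) (xs := s)
        (by simpa using h) (Char.ofNat 0) (by simp) (pvEncB rest)
      have henc : pvEncB (0 :: rest) = Char.ofNat 0 :: pvEncB rest := by
        simp [pvEncB]
      rw [henc, hsplit, List.map_cons,
        List.dropLast_cons_of_ne_nil (by simp [List.splitOnP_ne_nil]),
        List.filter_cons]
      by_cases hs : s = [] <;> simp [hs]
    · have henc : pvEncB (c :: rest) =
          (if 31 < c ∧ c < 127 then [Char.ofNat c.toNat] else []) ++ pvEncB rest := by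
        simp [pvEncB, hc]
      by_cases hp : 31 < c ∧ c < 127
      · have hstep : pvStepA (s, acc) c = (s ++ [Char.ofNat c.toNat], acc) := by
          have : c < 127 ∧ c > 31 := ⟨hp.2, hp.1⟩
          simp [pvStepA, hc, this]
        rw [hstep, henc, if_pos hp]
        have h' : ∀ x ∈ s ++ [Char.ofNat c.toNat], ¬ ((x == Char.ofNat 0) = true) := by
          intro x hx
          rcases List.mem_append.1 hx with hx' | hx'
          · exact h x hx'
          · simp only [List.mem_singleton] at hx'
            subst hx'
            exact pv_ch_ne c hp.1 hp.2
        rw [ih _ acc h']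
        simp
      · have hstep : pvStepA (s, acc) c = (s, acc) := by
          have : ¬ (c < 127 ∧ c > 31) := by
            intro hcc; exact hp ⟨hcc.2, hcc.1⟩
          simp [pvStepA, hc, this]
        rw [hstep, henc, if_neg hp, List.nil_append]
        exact ih s acc h

-- ===== VERDICT (by name: the statement is the Claim_ definition above) =====
theorem process_str_block_spec : Claim_equal_process_str_block := by
  intro block _
  unfold Spec_process_str_block process_str_block process_str_block_alt
  rw [pv_key block [] [] (by simp)]
  simp [List.splitOn, List.map_dropLast]
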